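-- pv_equiv track=rewrite | github.com/exaxorg/accelerator | accelerator/colourwrapper.py | _literal_split
-- ===== SOURCE A (Python) =====
-- def _literal_split(pieces):
-- 	have = []
-- 	for piece in pieces:
-- 		if piece.startswith('<'):
-- 			if have:
-- 				yield '\x1b[' + ';'.join(have) + 'm'
-- 				have = []
-- 			yield piece[1:]
-- 		else:
-- 			have.append(piece)
-- 	if have:
-- 		yield '\x1b[' + ';'.join(have) + 'm'
-- ===== SOURCE B (Python) =====
-- def _literal_split(pieces):
-- 	pieces = list(pieces)
-- 	i, n = 0, len(pieces)
-- 	while i < n: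
-- 		if pieces[i].startswith('<'):
-- 			yield pieces[i][1:]
-- 			i += 1
-- 		else:
-- 			j = i
-- 			while j < n and not pieces[j].startswith('<'):
-- 				j += 1
-- 			yield '\x1b[' + ';'.join(pieces[i:j]) + 'm'
-- 			i = j
-- ===== Notes on version B (the rewrite author's own statement) =====
-- stated objective: alternative
-- what changed: Replaces the accumulator-and-flush loop by a two-index run scanner: each maximal run of non-'<' pieces is located with an inner scan and joined directly from a slice, so no 'have' list is maintained or flushed.
import Mathlib
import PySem

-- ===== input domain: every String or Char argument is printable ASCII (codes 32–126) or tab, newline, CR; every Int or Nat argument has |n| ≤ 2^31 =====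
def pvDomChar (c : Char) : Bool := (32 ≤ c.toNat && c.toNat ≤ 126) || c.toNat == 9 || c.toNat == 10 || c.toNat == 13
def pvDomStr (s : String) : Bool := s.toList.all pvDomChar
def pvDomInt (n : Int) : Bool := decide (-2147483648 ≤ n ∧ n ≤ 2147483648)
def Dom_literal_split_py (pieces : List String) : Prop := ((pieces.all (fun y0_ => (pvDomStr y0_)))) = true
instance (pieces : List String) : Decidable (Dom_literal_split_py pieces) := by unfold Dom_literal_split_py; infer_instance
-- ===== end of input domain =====

-- B replaces A's accumulator-and-flush loop by a two-index run scanner (takeWhile/dropWhile over runs); alternative decomposition, same cost.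


-- ===== PORT A =====
-- piece.startswith('<')
def pvKey (p : String) : Bool := PySem.Str.startswith p "<"
-- '\x1b[' + ';'.join(have) + 'm'
def pvEsc (hv : List String) : String := "\x1b[" ++ PySem.Str.join ";" hv ++ "m"

-- A's loop: 'have' is the accumulator, flushed when a '<'-piece arrives and at the end.
def pvAGo (hv : List String) : List String → List String
  | [] => if hv.isEmpty then [] else [pvEsc hv]
  | p :: rest =>
    if pvKey p then
      (if hv.isEmpty then [] else [pvEsc hv]) ++ (PySem.Str.slice p (some 1) none :: pvAGo [] rest)
    else pvAGo (hv ++ [p]) rest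

def literal_split_py (pieces : List String) : List String := pvAGo [] pieces

-- ===== PORT B =====
-- B's run scanner: a '<'-piece yields its tail; otherwise the whole maximal
-- non-'<' run (pieces[i:j] in Source B = takeWhile here) is joined at once and skipped.
def literal_split_py_alt (pieces : List String) : List String :=
  match pieces with
  | [] => []
  | p :: rest =>
    if pvKey p then
      PySem.Str.slice p (some 1) none :: literal_split_py_alt rest
    else
      pvEsc (p :: rest.takeWhile (fun q => !pvKey q)) ::
        literal_split_py_alt (rest.dropWhile (fun q => !pvKey q))
termination_by pieces.length
decreasing_by
  · simp
  · have := List.length_dropWhile_le (fun q => !pvKey q) rest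
    simp; omega

-- ===== PRECONDITION & SPEC =====
def Spec_literal_split_py (pieces : List String) (out : List String) : Prop := out = literal_split_py_alt pieces
instance (pieces : List String) (out : List String) : Decidable (Spec_literal_split_py pieces out) := by unfold Spec_literal_split_py; infer_instance

-- ===== CLAIM (what is proved, stated in full; the proofs are below) =====
def Claim_equal_literal_split_py : Prop := ∀ (pieces : List String), Dom_literal_split_py pieces → Spec_literal_split_py pieces (literal_split_py pieces)

-- ===== LEMMAS AND PROOFS =====
-- Loop invariant: running A's loop with pending accumulator hv equals B on the rest,
-- with the pending run prepended to the first maximal non-'<' run when hv ≠ [].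
theorem pvAGo_eq (rest : List String) : ∀ (hv : List String),
    pvAGo hv rest =
      if hv.isEmpty then literal_split_py_alt rest
      else pvEsc (hv ++ rest.takeWhile (fun q => !pvKey q)) ::
             literal_split_py_alt (rest.dropWhile (fun q => !pvKey q)) := by
  induction rest with
  | nil =>
      intro hv
      cases hv <;> simp [pvAGo, literal_split_py_alt]
  | cons p rest ih =>
      intro hv
      by_cases hk : pvKey p
      · cases hv <;>
          simp [pvAGo, hk, literal_split_py_alt, ih [], List.takeWhile, List.dropWhile]
      · have hstep : pvAGo hv (p :: rest) = pvAGo (hv ++ [p]) rest := by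
          simp [pvAGo, hk]
        rw [hstep, ih (hv ++ [p])]
        cases hv <;>
          simp [literal_split_py_alt, hk, List.takeWhile, List.dropWhile]

-- ===== VERDICT (by name: the statement is the Claim_ definition above) =====
theorem literal_split_py_spec : Claim_equal_literal_split_py := by
  intro pieces _
  unfold Spec_literal_split_py literal_split_py
  simp [pvAGo_eq]
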